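-- pv_equiv track=rewrite | github.com/grasshopperTrainer/coding_practice | baekjoon/accepted/14888 연산자 끼워넣기.py | solution
-- ===== SOURCE A (Python) =====
-- from itertools import permutations
--
-- def solution(N, sequence, sign_count):
--     ADD, SUB, MUL, DIV = 0, 1, 2, 3
--
--     sign_seq = []
--     for sign, count in zip((ADD, SUB, MUL, DIV), sign_count):
--         sign_seq += [sign] * count
--     first_num = sequence[0]
--     sequence = sequence[1:]
--     small, big = 1000000000, -1000000000
--     used_order = set()
--     for signs in permutations(sign_seq):
--         if signs in used_order:
--             continue
--         used_order.add(signs)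
--
--         calced = first_num
--         for n, sign in zip(sequence, signs):
--             if sign == ADD:
--                 calced += n
--             elif sign == SUB:
--                 calced -= n
--             elif sign == MUL:
--                 calced *= n
--             else:  # div
--                 mark = 1 if calced >= 0 else -1
--                 calced = abs(calced) // n * mark
--
--         big = max([big, calced])
--         small = min([small, calced])
--
--     return f'{big}\n{small}'
-- ===== SOURCE B (Python) =====
-- def solution(N, sequence, sign_count):
--     # DFS over the remaining counts of the four operators: each distinct
--     # arrangement is visited exactly once, updating the running max/min.
--     add, sub, mul, div = (sign_count + [0, 0, 0, 0])[:4]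
--     big, small = -1000000000, 1000000000
--
--     def dfs(acc, rest, add, sub, mul, div):
--         nonlocal big, small
--         if not rest or (add <= 0 and sub <= 0 and mul <= 0 and div <= 0):
--             big = max(big, acc)
--             small = min(small, acc)
--             return
--         n, tail = rest[0], rest[1:]
--         if add > 0:
--             dfs(acc + n, tail, add - 1, sub, mul, div)
--         if sub > 0:
--             dfs(acc - n, tail, add, sub - 1, mul, div)
--         if mul > 0:
--             dfs(acc * n, tail, add, sub, mul - 1, div)
--         if div > 0:
--             dfs(acc // n if acc >= 0 else -(-acc // n), tail, add, sub, mul, div - 1)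
--
--     dfs(sequence[0], sequence[1:], add, sub, mul, div)
--     return f'{big}\n{small}'
-- ===== Notes on version B (the rewrite author's own statement) =====
-- stated objective: alternative
-- what changed: Replaces enumeration of all (n-1)! operator permutations with a dedup set by a DFS over the four remaining operator counts that visits each distinct arrangement exactly once while updating the running max/min (fewer leaves, though still exponential, so no measured speed-up); Pre_ excludes only the inputs on which A raises (empty sequence: IndexError; a division operator able to meet a zero operand: ZeroDivisionError).
import Mathlib
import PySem

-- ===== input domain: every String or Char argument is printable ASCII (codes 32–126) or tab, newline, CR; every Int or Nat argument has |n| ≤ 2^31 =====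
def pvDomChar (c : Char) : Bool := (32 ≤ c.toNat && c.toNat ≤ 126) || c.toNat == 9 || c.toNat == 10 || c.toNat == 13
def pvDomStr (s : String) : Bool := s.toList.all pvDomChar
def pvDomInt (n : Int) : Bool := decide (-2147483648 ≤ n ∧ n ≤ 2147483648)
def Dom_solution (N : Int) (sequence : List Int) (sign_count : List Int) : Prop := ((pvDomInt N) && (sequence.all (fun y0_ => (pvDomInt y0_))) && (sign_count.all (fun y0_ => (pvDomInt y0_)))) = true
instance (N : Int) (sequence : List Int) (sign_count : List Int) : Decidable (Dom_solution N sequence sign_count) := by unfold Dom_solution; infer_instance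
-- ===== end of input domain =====

set_option maxHeartbeats 1000000


-- B replaces A's scan of all (n-1)! operator permutations (with a dedup set) by a DFS over
-- the four remaining operator counts, visiting each distinct arrangement exactly once.

-- ===== PORT A =====
-- one step of A's inner `for n, sign in zip(sequence, signs)` loop
def pvApplyA (calced : Int) (sign : Int) (n : Int) : Int :=
  if sign = 0 then calced + n
  else if sign = 1 then calced - n
  else if sign = 2 then calced * n
  else
    let mark : Int := if calced ≥ 0 then 1 else -1
    PySem.Int.floordiv |calced| n * mark

-- A's inner loop: `calced = first_num; for n, sign in zip(sequence, signs): …`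
def pvEvalA (first : Int) (nums : List Int) (signs : List Int) : Int :=
  (nums.zip signs).foldl (fun c p => pvApplyA c p.2 p.1) first

-- the body of A's `for signs in permutations(sign_seq)` loop (state: used_order, big, small)
def pvStepA (first : Int) (nums : List Int)
    (st : PySem.Set (List Int) × Int × Int) (signs : List Int) :
    PySem.Set (List Int) × Int × Int :=
  if st.1.contains signs then st
  else
    let calced := pvEvalA first nums signs
    (st.1.add signs, max st.2.1 calced, min st.2.2 calced)

def solution (N : Int) (sequence : List Int) (sign_count : List Int) : String :=
  let sign_seq : List Int :=
    (List.zip [0, 1, 2, 3] sign_count).foldl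
      (fun acc p => acc ++ List.replicate p.2.toNat p.1) []
  match sequence with
  | [] => ""   -- Python raises IndexError on `sequence[0]`; excluded by Pre_solution
  | first_num :: rest =>
    let st := (PySem.List.permutations sign_seq sign_seq.length).foldl
      (pvStepA first_num rest) (PySem.Set.empty, -1000000000, 1000000000)
    PySem.Int.toStr st.2.1 ++ "\n" ++ PySem.Int.toStr st.2.2

-- ===== PORT B =====
-- B's `acc // n if acc >= 0 else -(-acc // n)`
def pvDivB (acc n : Int) : Int :=
  if acc ≥ 0 then PySem.Int.floordiv acc n else -(PySem.Int.floordiv (-acc) n)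

-- B's recursive `dfs(acc, rest, add, sub, mul, div)`; the nonlocal pair (big, small) is the
-- threaded state `st`, updated in the order the four recursive calls run.
def pvDfsB : Int × Int → Int → List Int → Int → Int → Int → Int → Int × Int
  | st, acc, [], _, _, _, _ => (max st.1 acc, min st.2 acc)
  | st, acc, n :: tail, a, s, m, d =>
    if a ≤ 0 ∧ s ≤ 0 ∧ m ≤ 0 ∧ d ≤ 0 then (max st.1 acc, min st.2 acc)
    else
      let st1 := if a > 0 then pvDfsB st (acc + n) tail (a - 1) s m d else st
      let st2 := if s > 0 then pvDfsB st1 (acc - n) tail a (s - 1) m d else st1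
      let st3 := if m > 0 then pvDfsB st2 (acc * n) tail a s (m - 1) d else st2
      if d > 0 then pvDfsB st3 (pvDivB acc n) tail a s m (d - 1) else st3

def solution_alt (N : Int) (sequence : List Int) (sign_count : List Int) : String :=
  -- `add, sub, mul, div = (sign_count + [0, 0, 0, 0])[:4]`
  let p := PySem.List.slice (sign_count ++ [0, 0, 0, 0]) none (some 4)
  match sequence with
  | [] => ""   -- Python raises IndexError on `sequence[0]`; excluded by Pre_solution
  | first :: rest =>
    let st := pvDfsB (-1000000000, 1000000000) first rest
      (p.getD 0 0) (p.getD 1 0) (p.getD 2 0) (p.getD 3 0)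
    PySem.Int.toStr st.1 ++ "\n" ++ PySem.Int.toStr st.2

-- ===== PRECONDITION & SPEC =====
-- Pre_ excludes exactly the inputs on which A raises: the empty sequence (IndexError on
-- sequence[0]) and inputs where a division operator can meet a zero operand in some
-- arrangement (ZeroDivisionError): division count > 0 and a zero among the operands any
-- arrangement can consume (the first `total signs` entries of the tail).
def Pre_solution (N : Int) (sequence : List Int) (sign_count : List Int) : Prop :=
  sequence ≠ [] ∧
  (0 < sign_count.getD 3 0 →
    ∀ x ∈ sequence.tail.take
      ((sign_count.getD 0 0).toNat + (sign_count.getD 1 0).toNat +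
        (sign_count.getD 2 0).toNat + (sign_count.getD 3 0).toNat),
      x ≠ 0)
instance (N : Int) (sequence : List Int) (sign_count : List Int) : Decidable (Pre_solution N sequence sign_count) := by unfold Pre_solution; infer_instance

def pvWitness_solution : Int × List Int × List Int := (3, ([5, 2, 6] : List Int), ([1, 1, 0, 0] : List Int))

def Spec_solution (N : Int) (sequence : List Int) (sign_count : List Int) (out : String) : Prop := out = solution_alt N sequence sign_count
instance (N : Int) (sequence : List Int) (sign_count : List Int) (out : String) : Decidable (Spec_solution N sequence sign_count out) := by unfold Spec_solution; infer_instance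

-- ===== CLAIM (what is proved, stated in full; the proofs are below) =====
def Claim_equal_solution : Prop := ∀ (N : Int) (sequence : List Int) (sign_count : List Int), Dom_solution N sequence sign_count → Pre_solution N sequence sign_count → Spec_solution N sequence sign_count (solution N sequence sign_count)

-- ===== LEMMAS AND PROOFS =====

-- the multiset of operator codes with the given multiplicities, as a canonical list
def pvCanon (a s m d : Nat) : List Int :=
  List.replicate a 0 ++ List.replicate s 1 ++ List.replicate m 2 ++ List.replicate d 3

-- A's zip-fold evaluation, in structurally recursive form
def pvEvalZ : Int → List Int → List Int → Int
  | c, [], _ => c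
  | c, _ :: _, [] => c
  | c, n :: ns, g :: gs => pvEvalZ (pvApplyA c g n) ns gs

theorem pvEvalA_eq_evalZ (nums : List Int) : ∀ (signs : List Int) (c : Int),
    pvEvalA c nums signs = pvEvalZ c nums signs := by
  induction nums with
  | nil => intro signs c; cases signs <;> simp [pvEvalA, pvEvalZ]
  | cons n ns ih =>
    intro signs c
    cases signs with
    | nil => simp [pvEvalA, pvEvalZ]
    | cons g gs => simpa [pvEvalA, pvEvalZ] using ih gs (pvApplyA c g n)

theorem pvApplyA_zero (c n : Int) : pvApplyA c 0 n = c + n := by simp [pvApplyA]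
theorem pvApplyA_one (c n : Int) : pvApplyA c 1 n = c - n := by norm_num [pvApplyA]
theorem pvApplyA_two (c n : Int) : pvApplyA c 2 n = c * n := by norm_num [pvApplyA]
theorem pvApplyA_three (c n : Int) : pvApplyA c 3 n = pvDivB c n := by
  by_cases h : c ≥ 0 <;>
    simp [pvApplyA, pvDivB, h, abs_of_nonneg, abs_of_neg, lt_of_not_ge, mul_comm]

-- characterization of A's permutation loop by upper/lower bounds
theorem pvStepA_char (first : Int) (nums : List Int) (L : List (List Int)) :
    ∀ (u : PySem.Set (List Int)) (b s k k' : Int),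
    ((L.foldl (pvStepA first nums) (u, b, s)).2.1 ≤ k ↔
      b ≤ k ∧ ∀ p ∈ L, p ∉ u → pvEvalA first nums p ≤ k) ∧
    (k' ≤ (L.foldl (pvStepA first nums) (u, b, s)).2.2 ↔
      k' ≤ s ∧ ∀ p ∈ L, p ∉ u → k' ≤ pvEvalA first nums p) := by
  induction L with
  | nil => intro u b s k k'; simp
  | cons q t ih =>
    intro u b s k k'
    by_cases hq : q ∈ u
    · have hc : u.contains q = true := (PySem.Set.contains_iff u q).mpr hq
      simp only [List.foldl_cons, pvStepA, hc, if_pos]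
      obtain ⟨ih1, ih2⟩ := ih u b s k k'
      rw [ih1, ih2]
      constructor
      · constructor
        · rintro ⟨h1, h2⟩
          exact ⟨h1, fun p hp hpu => by
            rcases List.mem_cons.mp hp with rfl | hp'
            · exact absurd hq hpu
            · exact h2 p hp' hpu⟩
        · rintro ⟨h1, h2⟩
          exact ⟨h1, fun p hp hpu => h2 p (List.mem_cons.mpr (Or.inr hp)) hpu⟩
      · constructor
        · rintro ⟨h1, h2⟩
          exact ⟨h1, fun p hp hpu => by
            rcases List.mem_cons.mp hp with rfl | hp'
            · exact absurd hq hpu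
            · exact h2 p hp' hpu⟩
        · rintro ⟨h1, h2⟩
          exact ⟨h1, fun p hp hpu => h2 p (List.mem_cons.mpr (Or.inr hp)) hpu⟩
    · have hc : ¬ u.contains q = true := fun h => hq ((PySem.Set.contains_iff u q).mp h)
      simp only [List.foldl_cons, pvStepA, hc, if_neg, Bool.not_eq_true]
      obtain ⟨ih1, ih2⟩ := ih (u.add q) (max b (pvEvalA first nums q)) (min s (pvEvalA first nums q)) k k'
      rw [ih1, ih2]
      constructor
      · constructor
        · rintro ⟨h1, h2⟩
          rcases max_le_iff.mp h1 with ⟨hb, hfq⟩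
          refine ⟨hb, fun p hp hpu => ?_⟩
          rcases List.mem_cons.mp hp with rfl | hp'
          · exact hfq
          · by_cases hpq : p = q
            · subst hpq; exact hfq
            · exact h2 p hp' (fun hmem => by
                rcases (PySem.Set.mem_add u q p).mp hmem with h' | h'
                · exact hpu h'
                · exact hpq h')
        · rintro ⟨h1, h2⟩
          have hfq : pvEvalA first nums q ≤ k := h2 q (List.mem_cons_self) hq
          refine ⟨max_le h1 hfq, fun p hp hpu => ?_⟩
          have hpu' : p ∉ u := fun h' => hpu ((PySem.Set.mem_add u q p).mpr (Or.inl h'))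
          exact h2 p (List.mem_cons.mpr (Or.inr hp)) hpu'
      · constructor
        · rintro ⟨h1, h2⟩
          rcases le_min_iff.mp h1 with ⟨hb, hfq⟩
          refine ⟨hb, fun p hp hpu => ?_⟩
          rcases List.mem_cons.mp hp with rfl | hp'
          · exact hfq
          · by_cases hpq : p = q
            · subst hpq; exact hfq
            · exact h2 p hp' (fun hmem => by
                rcases (PySem.Set.mem_add u q p).mp hmem with h' | h'
                · exact hpu h'
                · exact hpq h')
        · rintro ⟨h1, h2⟩
          have hfq : k' ≤ pvEvalA first nums q := h2 q (List.mem_cons_self) hq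
          refine ⟨le_min h1 hfq, fun p hp hpu => ?_⟩
          have hpu' : p ∉ u := fun h' => hpu ((PySem.Set.mem_add u q p).mpr (Or.inl h'))
          exact h2 p (List.mem_cons.mpr (Or.inr hp)) hpu'

theorem pvExists_idx (x : Int) (xs : List Int) (h : x ∈ xs) :
    ∃ i, i < xs.length ∧ xs[i]? = some x ∧ xs.eraseIdx i = xs.erase x := by
  induction xs with
  | nil => simp at h
  | cons y t ih =>
    by_cases hxy : y = x
    · subst hxy
      exact ⟨0, by simp, by simp, by simp⟩
    · have hx : x ∈ t := by rcases List.mem_cons.mp h with rfl | h'; exact absurd rfl hxy; exact h'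
      obtain ⟨i, hi, hg, he⟩ := ih hx
      refine ⟨i + 1, by simpa using hi, by simpa using hg, ?_⟩
      rw [List.eraseIdx_cons_succ, he, List.erase_cons_tail]
      simp [hxy]

-- every permutation (as a Perm) is listed by PySem.List.permutations at full length
theorem pvMem_permutations_of_perm : ∀ (p xs : List Int), p.Perm xs →
    p ∈ PySem.List.permutations xs xs.length := by
  intro p
  induction p with
  | nil =>
    intro xs hp
    have : xs = [] := List.perm_nil.mp hp.symm
    subst this
    simp [PySem.List.permutations_zero]
  | cons g p' ih =>
    intro xs hp
    obtain ⟨hmem, hperm⟩ := List.cons_perm_iff_perm_erase.mp hp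
    obtain ⟨i, hi, hg, he⟩ := pvExists_idx g xs hmem
    have hlen : xs.length = p'.length + 1 := by
      have := hp.length_eq; simpa using this.symm
    rw [hlen, PySem.List.permutations_succ]
    apply List.mem_flatMap.mpr
    refine ⟨i, by simp; omega, ?_⟩
    rw [hg]
    apply List.mem_map.mpr
    refine ⟨p', ?_, rfl⟩
    have hlen2 : (xs.eraseIdx i).length = p'.length := by
      rw [List.length_eraseIdx_of_lt hi]; omega
    have := ih (xs.eraseIdx i) (by rw [he]; exact hperm)
    rwa [hlen2] at this

theorem pvMem_canon (g : Int) (a s m d : Nat) :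
    g ∈ pvCanon a s m d ↔
      (a ≠ 0 ∧ g = 0) ∨ (s ≠ 0 ∧ g = 1) ∨ (m ≠ 0 ∧ g = 2) ∨ (d ≠ 0 ∧ g = 3) := by
  simp [pvCanon, List.mem_append, List.mem_replicate]

theorem pvErase_canon0 (a s m d : Nat) (h : 0 < a) :
    (pvCanon a s m d).erase 0 = pvCanon (a - 1) s m d := by
  cases a with
  | zero => omega
  | succ a' =>
    unfold pvCanon
    rw [List.erase_append_left _ (by simp [List.mem_append, List.mem_replicate]),
        List.erase_append_left _ (by simp [List.mem_append, List.mem_replicate]),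
        List.erase_append_left _ (by simp [List.mem_replicate])]
    simp [List.replicate_succ]

theorem pvErase_canon1 (a s m d : Nat) (h : 0 < s) :
    (pvCanon a s m d).erase 1 = pvCanon a (s - 1) m d := by
  cases s with
  | zero => omega
  | succ s' =>
    unfold pvCanon
    rw [List.erase_append_left _ (by simp [List.mem_append, List.mem_replicate]),
        List.erase_append_left _ (by simp [List.mem_append, List.mem_replicate]),
        List.erase_append_right _ (by simp [List.mem_replicate])]
    simp [List.replicate_succ]

theorem pvErase_canon2 (a s m d : Nat) (h : 0 < m) :
    (pvCanon a s m d).erase 2 = pvCanon a s (m - 1) d := by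
  cases m with
  | zero => omega
  | succ m' =>
    unfold pvCanon
    rw [List.erase_append_left _ (by simp [List.mem_append, List.mem_replicate]),
        List.erase_append_right _ (by simp [List.mem_append, List.mem_replicate])]
    simp [List.replicate_succ]

theorem pvErase_canon3 (a s m d : Nat) (h : 0 < d) :
    (pvCanon a s m d).erase 3 = pvCanon a s m (d - 1) := by
  cases d with
  | zero => omega
  | succ d' =>
    unfold pvCanon
    rw [List.erase_append_right _ (by simp [List.mem_append, List.mem_replicate])]
    simp [List.replicate_succ]

theorem pvPerm_canon_decompose (a s m d : Nat) (h : a + s + m + d ≠ 0)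
    (P : List Int → Prop) :
    (∀ gs, gs.Perm (pvCanon a s m d) → P gs) ↔
      ((0 < a → ∀ gs, gs.Perm (pvCanon (a - 1) s m d) → P (0 :: gs)) ∧
       (0 < s → ∀ gs, gs.Perm (pvCanon a (s - 1) m d) → P (1 :: gs)) ∧
       (0 < m → ∀ gs, gs.Perm (pvCanon a s (m - 1) d) → P (2 :: gs)) ∧
       (0 < d → ∀ gs, gs.Perm (pvCanon a s m (d - 1)) → P (3 :: gs))) := by
  constructor
  · intro H
    refine ⟨fun ha gs hp => H _ ?_, fun hs gs hp => H _ ?_, fun hm gs hp => H _ ?_,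
      fun hd gs hp => H _ ?_⟩
    · exact List.cons_perm_iff_perm_erase.mpr
        ⟨(pvMem_canon 0 a s m d).mpr (Or.inl ⟨by omega, rfl⟩),
         by rwa [pvErase_canon0 a s m d ha]⟩
    · exact List.cons_perm_iff_perm_erase.mpr
        ⟨(pvMem_canon 1 a s m d).mpr (Or.inr (Or.inl ⟨by omega, rfl⟩)),
         by rwa [pvErase_canon1 a s m d hs]⟩
    · exact List.cons_perm_iff_perm_erase.mpr
        ⟨(pvMem_canon 2 a s m d).mpr (Or.inr (Or.inr (Or.inl ⟨by omega, rfl⟩))),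
         by rwa [pvErase_canon2 a s m d hm]⟩
    · exact List.cons_perm_iff_perm_erase.mpr
        ⟨(pvMem_canon 3 a s m d).mpr (Or.inr (Or.inr (Or.inr ⟨by omega, rfl⟩))),
         by rwa [pvErase_canon3 a s m d hd]⟩
  · rintro ⟨H0, H1, H2, H3⟩ gs hp
    cases gs with
    | nil =>
      exfalso
      have := hp.length_eq
      simp [pvCanon] at this
      omega
    | cons g gs' =>
      obtain ⟨hmem, hperm⟩ := List.cons_perm_iff_perm_erase.mp hp
      rcases (pvMem_canon g a s m d).mp hmem with ⟨ha, rfl⟩ | ⟨hs, rfl⟩ | ⟨hm, rfl⟩ | ⟨hd, rfl⟩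
      · exact H0 (by omega) gs' (by rwa [pvErase_canon0 a s m d (by omega)] at hperm)
      · exact H1 (by omega) gs' (by rwa [pvErase_canon1 a s m d (by omega)] at hperm)
      · exact H2 (by omega) gs' (by rwa [pvErase_canon2 a s m d (by omega)] at hperm)
      · exact H3 (by omega) gs' (by rwa [pvErase_canon3 a s m d (by omega)] at hperm)

-- characterization of B's DFS by upper/lower bounds
theorem pvDfsB_char (nums : List Int) : ∀ (st : Int × Int) (acc a s m d : Int) (k k' : Int),
    ((pvDfsB st acc nums a s m d).1 ≤ k ↔
      st.1 ≤ k ∧ ∀ gs, gs.Perm (pvCanon a.toNat s.toNat m.toNat d.toNat) →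
        pvEvalZ acc nums gs ≤ k) ∧
    (k' ≤ (pvDfsB st acc nums a s m d).2 ↔
      k' ≤ st.2 ∧ ∀ gs, gs.Perm (pvCanon a.toNat s.toNat m.toNat d.toNat) →
        k' ≤ pvEvalZ acc nums gs) := by
  induction nums with
  | nil =>
    intro st acc a s m d k k'
    simp only [pvDfsB]
    constructor
    · rw [max_le_iff]
      constructor
      · rintro ⟨h1, h2⟩; exact ⟨h1, fun gs _ => by simpa [pvEvalZ] using h2⟩
      · rintro ⟨h1, h2⟩
        exact ⟨h1, by simpa [pvEvalZ] using h2 (pvCanon _ _ _ _) (List.Perm.refl _)⟩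
    · rw [le_min_iff]
      constructor
      · rintro ⟨h1, h2⟩; exact ⟨h1, fun gs _ => by simpa [pvEvalZ] using h2⟩
      · rintro ⟨h1, h2⟩
        exact ⟨h1, by simpa [pvEvalZ] using h2 (pvCanon _ _ _ _) (List.Perm.refl _)⟩
  | cons n tail ih =>
    intro st acc a s m d k k'
    by_cases h0 : a ≤ 0 ∧ s ≤ 0 ∧ m ≤ 0 ∧ d ≤ 0
    · have hc : pvCanon a.toNat s.toNat m.toNat d.toNat = [] := by
        obtain ⟨h1, h2, h3, h4⟩ := h0
        have : a.toNat = 0 ∧ s.toNat = 0 ∧ m.toNat = 0 ∧ d.toNat = 0 := by omega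
        simp [pvCanon, this.1, this.2.1, this.2.2.1, this.2.2.2]
      simp only [pvDfsB, if_pos h0, hc]
      constructor
      · rw [max_le_iff]
        constructor
        · rintro ⟨h1, h2⟩
          refine ⟨h1, fun gs hgs => ?_⟩
          have : gs = [] := List.perm_nil.mp hgs
          subst this; simpa [pvEvalZ] using h2
        · rintro ⟨h1, h2⟩
          exact ⟨h1, by simpa [pvEvalZ] using h2 [] (List.Perm.refl _)⟩
      · rw [le_min_iff]
        constructor
        · rintro ⟨h1, h2⟩
          refine ⟨h1, fun gs hgs => ?_⟩
          have : gs = [] := List.perm_nil.mp hgs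
          subst this; simpa [pvEvalZ] using h2
        · rintro ⟨h1, h2⟩
          exact ⟨h1, by simpa [pvEvalZ] using h2 [] (List.Perm.refl _)⟩
    · have hne : a.toNat + s.toNat + m.toNat + d.toNat ≠ 0 := by
        rcases not_and_or.mp h0 with h | h
        · omega
        rcases not_and_or.mp h with h | h
        · omega
        rcases not_and_or.mp h with h | h <;> omega
      simp only [pvDfsB, if_neg h0]
      set st1 := if a > 0 then pvDfsB st (acc + n) tail (a - 1) s m d else st with hst1
      set st2 := if s > 0 then pvDfsB st1 (acc - n) tail a (s - 1) m d else st1 with hst2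
      set st3 := if m > 0 then pvDfsB st2 (acc * n) tail a s (m - 1) d else st2 with hst3
      set res := if d > 0 then pvDfsB st3 (pvDivB acc n) tail a s m (d - 1) else st3 with hres
      -- step lemmas, chained
      have H1 : (st1.1 ≤ k ↔ st.1 ≤ k ∧ (0 < a.toNat → ∀ gs,
            gs.Perm (pvCanon (a.toNat - 1) s.toNat m.toNat d.toNat) →
              pvEvalZ (acc + n) tail gs ≤ k)) ∧
          (k' ≤ st1.2 ↔ k' ≤ st.2 ∧ (0 < a.toNat → ∀ gs,
            gs.Perm (pvCanon (a.toNat - 1) s.toNat m.toNat d.toNat) →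
              k' ≤ pvEvalZ (acc + n) tail gs)) := by
        by_cases hg : a > 0
        · have ht : (a - 1).toNat = a.toNat - 1 := by omega
          have hih := ih st (acc + n) (a - 1) s m d k k'
          rw [ht] at hih
          simp only [hst1, if_pos hg]
          refine ⟨hih.1.trans ?_, hih.2.trans ?_⟩ <;>
          · constructor
            · rintro ⟨x, y⟩; exact ⟨x, fun _ => y⟩
            · rintro ⟨x, y⟩; exact ⟨x, y (by omega)⟩
        · have hz : ¬ 0 < a.toNat := by omega
          simp only [hst1, if_neg hg]
          constructor <;>
          · constructor
            · intro h; exact ⟨h, fun h' => absurd h' hz⟩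
            · exact fun h => h.1
      have H2 : (st2.1 ≤ k ↔ st1.1 ≤ k ∧ (0 < s.toNat → ∀ gs,
            gs.Perm (pvCanon a.toNat (s.toNat - 1) m.toNat d.toNat) →
              pvEvalZ (acc - n) tail gs ≤ k)) ∧
          (k' ≤ st2.2 ↔ k' ≤ st1.2 ∧ (0 < s.toNat → ∀ gs,
            gs.Perm (pvCanon a.toNat (s.toNat - 1) m.toNat d.toNat) →
              k' ≤ pvEvalZ (acc - n) tail gs)) := by
        by_cases hg : s > 0
        · have ht : (s - 1).toNat = s.toNat - 1 := by omega
          have hih := ih st1 (acc - n) a (s - 1) m d k k'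
          rw [ht] at hih
          simp only [hst2, if_pos hg]
          refine ⟨hih.1.trans ?_, hih.2.trans ?_⟩ <;>
          · constructor
            · rintro ⟨x, y⟩; exact ⟨x, fun _ => y⟩
            · rintro ⟨x, y⟩; exact ⟨x, y (by omega)⟩
        · have hz : ¬ 0 < s.toNat := by omega
          simp only [hst2, if_neg hg]
          constructor <;>
          · constructor
            · intro h; exact ⟨h, fun h' => absurd h' hz⟩
            · exact fun h => h.1
      have H3 : (st3.1 ≤ k ↔ st2.1 ≤ k ∧ (0 < m.toNat → ∀ gs,
            gs.Perm (pvCanon a.toNat s.toNat (m.toNat - 1) d.toNat) →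
              pvEvalZ (acc * n) tail gs ≤ k)) ∧
          (k' ≤ st3.2 ↔ k' ≤ st2.2 ∧ (0 < m.toNat → ∀ gs,
            gs.Perm (pvCanon a.toNat s.toNat (m.toNat - 1) d.toNat) →
              k' ≤ pvEvalZ (acc * n) tail gs)) := by
        by_cases hg : m > 0
        · have ht : (m - 1).toNat = m.toNat - 1 := by omega
          have hih := ih st2 (acc * n) a s (m - 1) d k k'
          rw [ht] at hih
          simp only [hst3, if_pos hg]
          refine ⟨hih.1.trans ?_, hih.2.trans ?_⟩ <;>
          · constructor
            · rintro ⟨x, y⟩; exact ⟨x, fun _ => y⟩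
            · rintro ⟨x, y⟩; exact ⟨x, y (by omega)⟩
        · have hz : ¬ 0 < m.toNat := by omega
          simp only [hst3, if_neg hg]
          constructor <;>
          · constructor
            · intro h; exact ⟨h, fun h' => absurd h' hz⟩
            · exact fun h => h.1
      have H4 : (res.1 ≤ k ↔ st3.1 ≤ k ∧ (0 < d.toNat → ∀ gs,
            gs.Perm (pvCanon a.toNat s.toNat m.toNat (d.toNat - 1)) →
              pvEvalZ (pvDivB acc n) tail gs ≤ k)) ∧
          (k' ≤ res.2 ↔ k' ≤ st3.2 ∧ (0 < d.toNat → ∀ gs,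
            gs.Perm (pvCanon a.toNat s.toNat m.toNat (d.toNat - 1)) →
              k' ≤ pvEvalZ (pvDivB acc n) tail gs)) := by
        by_cases hg : d > 0
        · have ht : (d - 1).toNat = d.toNat - 1 := by omega
          have hih := ih st3 (pvDivB acc n) a s m (d - 1) k k'
          rw [ht] at hih
          simp only [hres, if_pos hg]
          refine ⟨hih.1.trans ?_, hih.2.trans ?_⟩ <;>
          · constructor
            · rintro ⟨x, y⟩; exact ⟨x, fun _ => y⟩
            · rintro ⟨x, y⟩; exact ⟨x, y (by omega)⟩
        · have hz : ¬ 0 < d.toNat := by omega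
          simp only [hres, if_neg hg]
          constructor <;>
          · constructor
            · intro h; exact ⟨h, fun h' => absurd h' hz⟩
            · exact fun h => h.1
      constructor
      · rw [H4.1, H3.1, H2.1, H1.1,
          pvPerm_canon_decompose _ _ _ _ hne
            (fun gs => pvEvalZ acc (n :: tail) gs ≤ k)]
        simp only [pvEvalZ, pvApplyA_zero, pvApplyA_one, pvApplyA_two, pvApplyA_three]
        constructor
        · rintro ⟨⟨⟨⟨x, pa⟩, ps⟩, pm⟩, pd⟩; exact ⟨x, pa, ps, pm, pd⟩
        · rintro ⟨x, pa, ps, pm, pd⟩; exact ⟨⟨⟨⟨x, pa⟩, ps⟩, pm⟩, pd⟩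
      · rw [H4.2, H3.2, H2.2, H1.2,
          pvPerm_canon_decompose _ _ _ _ hne
            (fun gs => k' ≤ pvEvalZ acc (n :: tail) gs)]
        simp only [pvEvalZ, pvApplyA_zero, pvApplyA_one, pvApplyA_two, pvApplyA_three]
        constructor
        · rintro ⟨⟨⟨⟨x, pa⟩, ps⟩, pm⟩, pd⟩; exact ⟨x, pa, ps, pm, pd⟩
        · rintro ⟨x, pa, ps, pm, pd⟩; exact ⟨⟨⟨⟨x, pa⟩, ps⟩, pm⟩, pd⟩

-- `(sign_count + [0,0,0,0])[:4]` indexed at 0..3 equals getD on sign_count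
theorem pvPad_getD (sc : List Int) (i : Nat) (hi : i < 4) :
    (PySem.List.slice (sc ++ [0, 0, 0, 0]) none (some 4)).getD i 0 = sc.getD i 0 := by
  rcases sc with _ | ⟨x, _ | ⟨y, _ | ⟨z, _ | ⟨w, t⟩⟩⟩⟩ <;>
    interval_cases i <;>
    simp [PySem.List.slice, PySem.List.clampIdx, List.getD]

-- A's sign_seq is the canonical multiset list for the padded counts
theorem pvSignSeq_eq_canon (sc : List Int) :
    (List.zip ([0, 1, 2, 3] : List Int) sc).foldl
      (fun acc p => acc ++ List.replicate p.2.toNat p.1) [] =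
    pvCanon (sc.getD 0 0).toNat (sc.getD 1 0).toNat (sc.getD 2 0).toNat (sc.getD 3 0).toNat := by
  rcases sc with _ | ⟨x, _ | ⟨y, _ | ⟨z, _ | ⟨w, t⟩⟩⟩⟩ <;>
    simp [List.zip, pvCanon, List.getD]

theorem pvNot_mem_empty (p : List Int) : p ∉ (PySem.Set.empty : PySem.Set (List Int)) := by
  simp [PySem.Set.empty]

-- A's loop result equals B's DFS result (same sentinel start state)
theorem pvBigSmall (first : Int) (rest sc : List Int) :
    (let SS := (List.zip ([0, 1, 2, 3] : List Int) sc).foldl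
        (fun acc p => acc ++ List.replicate p.2.toNat p.1) []
     ((PySem.List.permutations SS SS.length).foldl (pvStepA first rest)
        (PySem.Set.empty, -1000000000, 1000000000)).2) =
    pvDfsB (-1000000000, 1000000000) first rest
      (sc.getD 0 0) (sc.getD 1 0) (sc.getD 2 0) (sc.getD 3 0) := by
  rw [pvSignSeq_eq_canon sc]
  set c0 := sc.getD 0 0
  set c1 := sc.getD 1 0
  set c2 := sc.getD 2 0
  set c3 := sc.getD 3 0
  set CL := pvCanon c0.toNat c1.toNat c2.toNat c3.toNat with hCL
  set perms := PySem.List.permutations CL CL.length with hperms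
  set r := pvDfsB (-1000000000, 1000000000) first rest c0 c1 c2 c3 with hr
  set AF := List.foldl (pvStepA first rest) (PySem.Set.empty, -1000000000, 1000000000) perms
    with hAF
  have hdfs := fun k k' =>
    pvDfsB_char rest (-1000000000, 1000000000) first c0 c1 c2 c3 k k'
  have hA := fun k k' =>
    pvStepA_char first rest perms PySem.Set.empty (-1000000000) 1000000000 k k'
  rw [← hAF] at hA
  have e1 : AF.2.1 = r.1 := by
    apply le_antisymm
    · apply ((hA r.1 0).1).mpr
      refine ⟨(((hdfs r.1 r.1).1).mp le_rfl).1, fun p hp _ => ?_⟩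
      have hperm : p.Perm CL := PySem.List.perm_of_mem_permutations hp
      rw [pvEvalA_eq_evalZ]
      exact (((hdfs r.1 r.1).1).mp le_rfl).2 p hperm
    · apply ((hdfs AF.2.1 0).1).mpr
      refine ⟨(((hA AF.2.1 0).1).mp le_rfl).1, fun gs hgs => ?_⟩
      have hmem : gs ∈ perms := pvMem_permutations_of_perm gs CL hgs
      have := (((hA AF.2.1 0).1).mp le_rfl).2 gs hmem (pvNot_mem_empty gs)
      rwa [pvEvalA_eq_evalZ] at this
  have e2 : AF.2.2 = r.2 := by
    apply le_antisymm
    · apply ((hdfs 0 AF.2.2).2).mpr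
      refine ⟨(((hA 0 AF.2.2).2).mp le_rfl).1, fun gs hgs => ?_⟩
      have hmem : gs ∈ perms := pvMem_permutations_of_perm gs CL hgs
      have := (((hA 0 AF.2.2).2).mp le_rfl).2 gs hmem (pvNot_mem_empty gs)
      rwa [pvEvalA_eq_evalZ] at this
    · apply ((hA 0 r.2).2).mpr
      refine ⟨(((hdfs r.2 r.2).2).mp le_rfl).1, fun p hp _ => ?_⟩
      have hperm : p.Perm CL := PySem.List.perm_of_mem_permutations hp
      rw [pvEvalA_eq_evalZ]
      exact (((hdfs r.2 r.2).2).mp le_rfl).2 p hperm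
  exact Prod.ext e1 e2

-- ===== VERDICT (by name: the statement is the Claim_ definition above) =====
theorem solution_spec : Claim_equal_solution := by
  intro N seq sc _ hpre
  unfold Spec_solution
  obtain ⟨hne, -⟩ := hpre
  cases seq with
  | nil => exact absurd rfl hne
  | cons first rest =>
    have key := pvBigSmall first rest sc
    simp only at key
    simp only [solution, solution_alt,
      pvPad_getD sc 0 (by omega), pvPad_getD sc 1 (by omega),
      pvPad_getD sc 2 (by omega), pvPad_getD sc 3 (by omega)]
    rw [← key]
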